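-- pv_equiv track=rewrite | github.com/Zjianglin/timePredict | utils/footprint.py | _parallel
-- ===== SOURCE A (Python) =====
-- def _parallel(activities, directly_follows):
--     '''Return all pairs of activities in a `parallel` relation.
--        i.e. a||b iff. a>b and b>a.
--     '''
--     parallel = set()
--     for a in activities:
--         for b in activities:
--             if (a, b) in directly_follows and (b, a) in directly_follows:
--                 parallel.add((a, b))
--                 parallel.add((b, a))
--     return parallel
-- ===== SOURCE B (Python) =====
-- def _parallel(activities, directly_follows):
--     '''Return all pairs of activities in a `parallel` relation.
--        i.e. a||b iff. a>b and b>a.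
--     '''
--     df = set(directly_follows)
--     mutual = {p for p in directly_follows if (p[1], p[0]) in df}
--     parallel = set()
--     rest = activities
--     while rest:
--         a = rest[0]
--         for b in rest:
--             if (a, b) in mutual:
--                 parallel.add((a, b))
--                 parallel.add((b, a))
--         rest = rest[1:]
--     return parallel
-- ===== Notes on version B (the rewrite author's own statement) =====
-- stated objective: alternative
-- what changed: B precomputes the set of mutually-followed pairs once from directly_follows (so the inner test's repeated list-membership scans disappear) and walks only the upper triangle of activity pairs (each suffix once), adding both orientations at the first encounter.
import Mathlib
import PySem

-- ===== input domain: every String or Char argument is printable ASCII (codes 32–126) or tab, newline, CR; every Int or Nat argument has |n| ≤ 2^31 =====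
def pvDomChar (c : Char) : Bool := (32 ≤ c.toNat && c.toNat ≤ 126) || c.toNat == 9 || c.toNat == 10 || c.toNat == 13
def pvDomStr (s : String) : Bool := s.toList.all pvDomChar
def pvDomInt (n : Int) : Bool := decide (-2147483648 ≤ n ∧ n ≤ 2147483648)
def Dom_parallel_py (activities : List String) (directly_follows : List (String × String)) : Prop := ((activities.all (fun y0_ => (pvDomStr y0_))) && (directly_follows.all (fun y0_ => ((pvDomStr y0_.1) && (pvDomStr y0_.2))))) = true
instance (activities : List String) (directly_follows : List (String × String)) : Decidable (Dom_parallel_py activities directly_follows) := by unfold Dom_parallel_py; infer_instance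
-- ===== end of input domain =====

-- B precomputes the mutual-pair set once and walks only the upper triangle of activity pairs (objective: alternative decomposition of the same result).


-- ===== PORT A =====
-- for a in activities: for b in activities: if (a,b) in df and (b,a) in df: add both
def parallel_py (activities : List String) (directly_follows : List (String × String)) : List (String × String) :=
  activities.foldl (fun par a =>
    activities.foldl (fun par b =>
      if directly_follows.contains (a, b) && directly_follows.contains (b, a) then
        PySem.Set.add (PySem.Set.add par (a, b)) (b, a)
      else par) par) []

-- ===== PORT B =====
-- the 'while rest: … rest = rest[1:]' loop of Source B (rest[1:] on a nonempty list is its tail)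
def parallelAltLoop (mutl : List (String × String)) : List String → List (String × String) → List (String × String)
  | [], par => par
  | a :: rest, par =>
      parallelAltLoop mutl rest
        ((a :: rest).foldl (fun par b =>
          if PySem.Set.contains mutl (a, b) then
            PySem.Set.add (PySem.Set.add par (a, b)) (b, a)
          else par) par)

def parallel_py_alt (activities : List String) (directly_follows : List (String × String)) : List (String × String) :=
  let dfs := PySem.Set.ofList directly_follows
  let mutl := PySem.Set.ofList (directly_follows.filter (fun p => PySem.Set.contains dfs (p.2, p.1)))
  parallelAltLoop mutl activities []

-- ===== PRECONDITION & SPEC =====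
def Spec_parallel_py (activities : List String) (directly_follows : List (String × String)) (out : List (String × String)) : Prop := out = parallel_py_alt activities directly_follows
instance (activities : List String) (directly_follows : List (String × String)) (out : List (String × String)) : Decidable (Spec_parallel_py activities directly_follows out) := by unfold Spec_parallel_py; infer_instance

-- ===== CLAIM (what is proved, stated in full; the proofs are below) =====
def Claim_equal_parallel_py : Prop := ∀ (activities : List String) (directly_follows : List (String × String)), Dom_parallel_py activities directly_follows → Spec_parallel_py activities directly_follows (parallel_py activities directly_follows)

-- ===== LEMMAS AND PROOFS =====

-- one conditional double-add step, for an arbitrary Bool test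
def pvStep (c : String → String → Bool) (a : String)
    (par : List (String × String)) (b : String) : List (String × String) :=
  if c a b then PySem.Set.add (PySem.Set.add par (a, b)) (b, a) else par

-- B's suffix loop, for an arbitrary Bool test
def pvLoopB (c : String → String → Bool) : List String → List (String × String) → List (String × String)
  | [], par => par
  | a :: rest, par => pvLoopB c rest ((a :: rest).foldl (pvStep c a) par)

theorem pvStep_mem {c : String → String → Bool} {a : String}
    {par : List (String × String)} {x : String × String} (h : x ∈ par) (b : String) :
    x ∈ pvStep c a par b := by
  unfold pvStep
  split
  · exact (PySem.Set.mem_add _ _ _).2 (Or.inl ((PySem.Set.mem_add _ _ _).2 (Or.inl h)))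
  · exact h

theorem pvFold_mem {c : String → String → Bool} {a : String}
    (l : List String) {par : List (String × String)} {x : String × String} (h : x ∈ par) :
    x ∈ l.foldl (pvStep c a) par := by
  induction l generalizing par with
  | nil => exact h
  | cons b t ih => exact ih (pvStep_mem h b)

theorem pvFold_noop {c : String → String → Bool} {a : String}
    (l : List String) {par : List (String × String)}
    (h : ∀ b ∈ l, c a b = true → (a, b) ∈ par ∧ (b, a) ∈ par) :
    l.foldl (pvStep c a) par = par := by
  induction l with
  | nil => rfl
  | cons b t ih =>
      have hstep : pvStep c a par b = par := by
        unfold pvStep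
        split
        · rename_i hc
          obtain ⟨h1, h2⟩ := h b (by simp) hc
          rw [PySem.Set.add_of_mem h1, PySem.Set.add_of_mem h2]
        · rfl
      simp only [List.foldl_cons, hstep]
      exact ih (fun b' hb' hc => h b' (by simp [hb']) hc)

theorem pvFold_adds {c : String → String → Bool} {a b : String}
    (l : List String) (par : List (String × String))
    (hb : b ∈ l) (hc : c a b = true) :
    (a, b) ∈ l.foldl (pvStep c a) par ∧ (b, a) ∈ l.foldl (pvStep c a) par := by
  induction l generalizing par with
  | nil => cases hb
  | cons b' t ih =>
      simp only [List.foldl_cons]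
      rcases List.mem_cons.1 hb with h | h
      · subst h
        have h1 : (a, b) ∈ pvStep c a par b := by
          unfold pvStep
          rw [hc]
          simp only [if_true]
          exact (PySem.Set.mem_add _ _ _).2 (Or.inl ((PySem.Set.mem_add _ _ _).2 (Or.inr rfl)))
        have h2 : (b, a) ∈ pvStep c a par b := by
          unfold pvStep
          rw [hc]
          simp only [if_true]
          exact (PySem.Set.mem_add _ _ _).2 (Or.inr rfl)
        exact ⟨pvFold_mem t h1, pvFold_mem t h2⟩
      · exact ih _ h

theorem pvMain (c : String → String → Bool) (hsym : ∀ a b, c a b = c b a)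
    (acts : List String) :
    ∀ (rem pre : List String) (par : List (String × String)),
      acts = pre ++ rem →
      (∀ b ∈ pre, ∀ a ∈ acts, c b a = true → (b, a) ∈ par ∧ (a, b) ∈ par) →
      rem.foldl (fun par a => acts.foldl (pvStep c a) par) par = pvLoopB c rem par := by
  intro rem
  induction rem with
  | nil => intro pre par _ _; rfl
  | cons a rest ih =>
      intro pre par hacts hinv
      simp only [List.foldl_cons, pvLoopB]
      have hrow : acts.foldl (pvStep c a) par = (a :: rest).foldl (pvStep c a) par := by
        rw [hacts, List.foldl_append]
        congr 1
        exact pvFold_noop pre (fun b hb hc => by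
          have := hinv b hb a (by rw [hacts]; simp) (by rw [hsym a b] at hc; exact hc)
          exact ⟨this.2, this.1⟩)
      rw [hrow]
      apply ih (pre ++ [a]) _ (by rw [hacts]; simp)
      intro b hb a' ha' hc
      rcases List.mem_append.1 hb with hbp | hba
      · have := hinv b hbp a' ha' hc
        exact ⟨pvFold_mem _ this.1, pvFold_mem _ this.2⟩
      · have hba : b = a := by simpa using hba
        subst hba
        rw [hacts] at ha'
        rcases List.mem_append.1 ha' with hp | hr
        · have := hinv a' hp b (by rw [hacts]; simp) (by rw [hsym a' b]; exact hc)
          exact ⟨pvFold_mem _ this.2, pvFold_mem _ this.1⟩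
        · exact pvFold_adds (b :: rest) par hr hc

theorem pvAltLoop_eq (mutl : List (String × String)) (rem : List String)
    (par : List (String × String)) :
    parallelAltLoop mutl rem par = pvLoopB (fun a b => PySem.Set.contains mutl (a, b)) rem par := by
  induction rem generalizing par with
  | nil => rfl
  | cons a rest ih => simp only [parallelAltLoop, pvLoopB]; exact ih _

theorem pvCond_eq (dfl : List (String × String)) (a b : String) :
    (dfl.contains (a, b) && dfl.contains (b, a)) =
      PySem.Set.contains
        (PySem.Set.ofList (dfl.filter (fun p => PySem.Set.contains (PySem.Set.ofList dfl) (p.2, p.1))))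
        (a, b) := by
  rw [Bool.eq_iff_iff]
  simp [PySem.Set.mem_ofList, List.mem_filter]

-- ===== VERDICT (by name: the statement is the Claim_ definition above) =====
theorem parallel_py_spec : Claim_equal_parallel_py := by
  intro acts dfl _
  unfold Spec_parallel_py parallel_py parallel_py_alt
  rw [pvAltLoop_eq]
  have hc : (fun a b => PySem.Set.contains
      (PySem.Set.ofList (dfl.filter (fun p => PySem.Set.contains (PySem.Set.ofList dfl) (p.2, p.1))))
      (a, b)) = fun a b => dfl.contains (a, b) && dfl.contains (b, a) := by
    funext a b
    exact (pvCond_eq dfl a b).symm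
  rw [hc]
  exact pvMain _ (fun a b => by simp [Bool.and_comm]) acts acts [] [] rfl (by simp)
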